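-- pv_equiv track=rewrite | github.com/eun-chae-s/Coding-Test-Prep | Heap/sort.py | _toSorted
-- ===== SOURCE A (Python) =====
-- def _toSorted(nums: list[int]) -> list[int]:
--     curr = len(nums) - 1
--     pt = 0
--
--     while curr > 1:
--         nums[pt], nums[curr] = nums[curr], nums[pt]
--
--         left, right = 1, 2
--
--         while right < curr:
--             if nums[left] < nums[right]:
--                 larger = right
--             else:
--                 larger = left
--
--             if nums[pt] < nums[larger]:
--                 nums[pt], nums[larger] = nums[larger], nums[pt]
--                 pt = larger
--                 left, right = 2 * pt + 1, 2 * pt + 2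
--             else:
--                 break
--
--         pt = 0
--         curr = curr - 1
--
--     if nums[0] > nums[1]:
--         nums[0], nums[1] = nums[1], nums[0]
--
--     return nums
-- ===== SOURCE B (Python) =====
-- def _sift(heap, i):
--     left, right = 2 * i + 1, 2 * i + 2
--     if right >= len(heap):
--         return
--     larger = right if heap[left] < heap[right] else left
--     if heap[i] < heap[larger]:
--         heap[i], heap[larger] = heap[larger], heap[i]
--         _sift(heap, larger)
--
--
-- def _toSorted(nums: list[int]) -> list[int]:
--     # shrinking-heap decomposition: pop the root into a tail list, move the
--     # last element to the root and sift down recursively; rebuild at the end.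
--     heap = nums[:]
--     tail = []
--     while len(heap) > 2:
--         tail.append(heap[0])
--         heap[0] = heap.pop()
--         _sift(heap, 0)
--     if heap[0] > heap[1]:
--         heap[0], heap[1] = heap[1], heap[0]
--     nums[:] = heap + tail[::-1]
--     return nums
-- ===== Notes on version B (the rewrite author's own statement) =====
-- stated objective: alternative
-- what changed: B replaces A's in-place whole-array extraction (swap root with nums[curr], iterative sift-down over the full list) by a shrinking heap list plus a tail of popped roots built back-to-front with a recursive sift-down, rebuilding the result at the end.
import Mathlib
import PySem

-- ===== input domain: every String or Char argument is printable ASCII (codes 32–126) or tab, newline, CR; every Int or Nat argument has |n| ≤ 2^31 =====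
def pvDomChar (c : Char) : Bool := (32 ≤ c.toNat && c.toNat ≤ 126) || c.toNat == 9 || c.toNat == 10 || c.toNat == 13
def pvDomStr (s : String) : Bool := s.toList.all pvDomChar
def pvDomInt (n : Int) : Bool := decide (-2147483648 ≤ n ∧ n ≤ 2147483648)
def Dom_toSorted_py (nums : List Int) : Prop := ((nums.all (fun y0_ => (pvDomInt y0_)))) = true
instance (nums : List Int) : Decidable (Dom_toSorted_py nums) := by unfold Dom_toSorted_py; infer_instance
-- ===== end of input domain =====

-- B re-decomposes the heapsort extraction as a shrinking heap list plus a tail of popped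
-- roots rebuilt at the end (objective: alternative; same cost); A mutates nums in place,
-- B mutates it to the same final state, and the equivalence proved here is about the return value.

-- Python simultaneous swap `l[i], l[j] = l[j], l[i]` (both reads from the original list).
def pvSwap (l : List Int) (i j : Nat) : List Int :=
  (l.set i (l.getD j 0)).set j (l.getD i 0)

-- `larger = right if xs[left] < xs[right] else left` with left = 2*i+1, right = 2*i+2;
-- this line is common to both Pythons and shared by both ports.
def pickLarger (xs : List Int) (i : Nat) : Nat :=
  if xs.getD (2 * i + 1) 0 < xs.getD (2 * i + 2) 0 then 2 * i + 2 else 2 * i + 1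

theorem pickLarger_bounds (xs : List Int) (i : Nat) :
    i < pickLarger xs i ∧ pickLarger xs i ≤ 2 * i + 2 := by
  unfold pickLarger; split <;> omega

-- ===== PORT A =====
-- cited by innerA's decreasing_by
theorem innerA_dec (nums : List Int) (pt curr : Nat) (h : 2 * pt + 2 < curr) :
    curr - pickLarger nums pt < curr - pt := by
  have := pickLarger_bounds nums pt; omega

-- A's inner `while right < curr` loop; `left, right = 2*pt+1, 2*pt+2` (initially 1, 2 = the
-- same with pt = 0); list indexing is always in range here, so getD is exact.
def innerA (nums : List Int) (pt curr : Nat) : List Int :=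
  if 2 * pt + 2 < curr then
    if nums.getD pt 0 < nums.getD (pickLarger nums pt) 0 then
      innerA (pvSwap nums pt (pickLarger nums pt)) (pickLarger nums pt) curr
    else nums
  else nums
  termination_by curr - pt
  decreasing_by exact innerA_dec nums pt curr ‹2 * pt + 2 < curr›

-- A's outer `while curr > 1` loop (pt is reset to 0 at every head).
-- cited by outerA's decreasing_by
theorem outerA_dec (curr : Nat) (h : 1 < curr) : curr - 1 < curr := by omega

def outerA (nums : List Int) (curr : Nat) : List Int :=
  if 1 < curr then outerA (innerA (pvSwap nums 0 curr) 0 curr) (curr - 1)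
  else nums
  termination_by curr
  decreasing_by exact outerA_dec curr ‹1 < curr›

-- `curr = len(nums) - 1` is taken in Nat; Pre_ guarantees len ≥ 2 so this matches Python.
def toSorted_py (nums : List Int) : List Int :=
  let r := outerA nums (nums.length - 1)
  if r.getD 0 0 > r.getD 1 0 then pvSwap r 0 1 else r

-- ===== PORT B =====
-- length of pvSwap: needed by the termination proofs below, cited there by name.
theorem pvSwap_length (l : List Int) (i j : Nat) : (pvSwap l i j).length = l.length := by
  simp [pvSwap]

-- cited by siftB's decreasing_by
theorem siftB_dec (heap : List Int) (i : Nat) (h : ¬ heap.length ≤ 2 * i + 2) :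
    (pvSwap heap i (pickLarger heap i)).length - pickLarger heap i < heap.length - i := by
  rw [pvSwap_length]; have := pickLarger_bounds heap i; omega

-- B's recursive _sift on the current heap (bound = len(heap), constant along the recursion).
def siftB (heap : List Int) (i : Nat) : List Int :=
  if heap.length ≤ 2 * i + 2 then heap
  else if heap.getD i 0 < heap.getD (pickLarger heap i) 0 then
    siftB (pvSwap heap i (pickLarger heap i)) (pickLarger heap i)
  else heap
  termination_by heap.length - i
  decreasing_by exact siftB_dec heap i ‹¬ heap.length ≤ 2 * i + 2›

theorem siftB_length (heap : List Int) (i : Nat) : (siftB heap i).length = heap.length := by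
  induction heap, i using siftB.induct with
  | case1 heap i h => rw [siftB]; simp [h]
  | case2 heap i h hlt ih => rw [siftB, if_neg h, if_pos hlt, ih, pvSwap_length]
  | case3 heap i h hlt => rw [siftB, if_neg h, if_neg hlt]

-- cited by outerB's decreasing_by
theorem outerB_dec (heap : List Int) (h : 2 < heap.length) :
    (siftB ((heap.set 0 (heap.getD (heap.length - 1) 0)).dropLast) 0).length < heap.length := by
  simp only [siftB_length, List.length_dropLast, List.length_set]; omega

-- B's `while len(heap) > 2` loop: pop the root into tail, move the last element to the root,
-- sift down; returns the 2-element final heap and the popped roots in pop order.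
def outerB (heap tail : List Int) : List Int × List Int :=
  if 2 < heap.length then
    outerB (siftB ((heap.set 0 (heap.getD (heap.length - 1) 0)).dropLast) 0)
           (tail ++ [heap.getD 0 0])
  else (heap, tail)
  termination_by heap.length
  decreasing_by exact outerB_dec heap ‹2 < heap.length›

def toSorted_py_alt (nums : List Int) : List Int :=
  let p := outerB nums []
  let h := if p.1.getD 0 0 > p.1.getD 1 0 then pvSwap p.1 0 1 else p.1
  h ++ p.2.reverse

-- ===== PRECONDITION & SPEC =====
-- Pre_ excludes lists of length < 2, on which A raises IndexError at its final
-- comparison of the first two elements.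
def Pre_toSorted_py (nums : List Int) : Prop := 2 ≤ nums.length
instance (nums : List Int) : Decidable (Pre_toSorted_py nums) := by unfold Pre_toSorted_py; infer_instance
def pvWitness_toSorted_py : List Int := [5, 3, 4, 1, 2]

def Spec_toSorted_py (nums : List Int) (out : List Int) : Prop := out = toSorted_py_alt nums
instance (nums : List Int) (out : List Int) : Decidable (Spec_toSorted_py nums out) := by unfold Spec_toSorted_py; infer_instance

-- ===== CLAIM (what is proved, stated in full; the proofs are below) =====
def Claim_equal_toSorted_py : Prop := ∀ (nums : List Int), Dom_toSorted_py nums → Pre_toSorted_py nums → Spec_toSorted_py nums (toSorted_py nums)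

-- ===== LEMMAS AND PROOFS =====

theorem getD_append_left (l r : List Int) (i : Nat) (h : i < l.length) :
    (l ++ r).getD i 0 = l.getD i 0 := by
  simp [List.getD, List.getElem?_append_left h]

theorem pvSwap_append (l r : List Int) (i j : Nat) (hi : i < l.length) (hj : j < l.length) :
    pvSwap (l ++ r) i j = pvSwap l i j ++ r := by
  unfold pvSwap
  rw [getD_append_left _ _ _ hi, getD_append_left _ _ _ hj,
      List.set_append_left _ _ hi,
      List.set_append_left _ _ (by simpa using hj)]

-- A's sift on a prefix of length `curr` touches only that prefix.
theorem pickLarger_append (l r : List Int) (pt : Nat) (h : 2 * pt + 2 < l.length) :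
    pickLarger (l ++ r) pt = pickLarger l pt := by
  unfold pickLarger
  rw [getD_append_left _ _ _ (by omega), getD_append_left _ _ _ (by omega)]

theorem inner_eq (n : Nat) (l r : List Int) (pt : Nat) (hn : l.length - pt ≤ n) :
    innerA (l ++ r) pt l.length = siftB l pt ++ r := by
  induction n generalizing l pt with
  | zero =>
    rw [innerA, siftB, if_neg (show ¬ 2 * pt + 2 < l.length by omega),
        if_pos (show l.length ≤ 2 * pt + 2 by omega)]
  | succ n ih =>
    rw [innerA, siftB]
    by_cases hc : 2 * pt + 2 < l.length
    · rw [if_pos hc, if_neg (show ¬ l.length ≤ 2 * pt + 2 by omega),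
          pickLarger_append _ _ _ hc]
      have hb := pickLarger_bounds l pt
      rw [getD_append_left _ _ _ (show pt < l.length by omega),
          getD_append_left _ _ _ (show pickLarger l pt < l.length by omega)]
      split
      · rw [pvSwap_append _ _ _ _ (show pt < l.length by omega)
              (show pickLarger l pt < l.length by omega)]
        have := ih (pvSwap l pt (pickLarger l pt)) (pickLarger l pt)
          (by rw [pvSwap_length]; omega)
        rw [← pvSwap_length l pt (pickLarger l pt)]
        exact this
      · rfl
    · rw [if_neg hc, if_pos (show l.length ≤ 2 * pt + 2 by omega)]

-- the tail parameter of outerB is a pure accumulator.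
theorem outerB_acc (n : Nat) (h acc : List Int) (hn : h.length ≤ n) :
    outerB h acc = ((outerB h []).1, acc ++ (outerB h []).2) := by
  induction n generalizing h acc with
  | zero =>
    have hno : ¬ 2 < h.length := by omega
    rw [outerB, if_neg hno]
    conv_rhs => rw [outerB, if_neg hno]
    simp
  | succ n ih =>
    conv_lhs => rw [outerB]
    conv_rhs => rw [outerB]
    by_cases hc : 2 < h.length
    · rw [if_pos hc, if_pos hc]
      have hK : (siftB ((h.set 0 (h.getD (h.length - 1) 0)).dropLast) 0).length ≤ n := by
        simp only [siftB_length, List.length_dropLast, List.length_set]; omega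
      simp only [List.nil_append]
      rw [ih _ _ hK, ih _ ([h.getD 0 0]) hK]
      simp
    · rw [if_neg hc, if_neg hc]
      simp

theorem outerB_fst_length (n : Nat) (h : List Int) (hn : h.length ≤ n)
    (h2 : 2 ≤ h.length) : (outerB h []).1.length = 2 := by
  induction n generalizing h with
  | zero => omega
  | succ n ih =>
    rw [outerB]
    by_cases hc : 2 < h.length
    · rw [if_pos hc,
          outerB_acc n _ _ (by simp only [siftB_length, List.length_dropLast, List.length_set]; omega)]
      exact ih _ (by simp only [siftB_length, List.length_dropLast, List.length_set]; omega)
        (by simp only [siftB_length, List.length_dropLast, List.length_set]; omega)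
    · rw [if_neg hc]; show h.length = 2; omega

-- setting the last entry of a list replaces it.
theorem set_last (l : List Int) (c : Nat) (a : Int) (h : l.length = c + 1) :
    l.set c a = l.dropLast ++ [a] := by
  rw [List.set_eq_take_cons_drop a (by omega), List.dropLast_eq_take]
  simp [h, List.drop_eq_nil_of_le (by omega : l.length ≤ c + 1)]

-- main invariant: A's extraction loop on H ++ T equals B's shrinking-heap loop on H.
theorem main_eq (c : Nat) (H T : List Int) (hH : H.length = c + 1) :
    outerA (H ++ T) c = (outerB H []).1 ++ ((outerB H []).2).reverse ++ T := by
  induction c generalizing H T with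
  | zero =>
    rw [outerA, if_neg (by omega), outerB, if_neg (by omega)]
    simp
  | succ c ih =>
    by_cases hc : 1 < c + 1
    · have hlen : H.length = c + 2 := by omega
      rw [outerA, if_pos hc, outerB, if_pos (show 2 < H.length by omega)]
      have hswap : pvSwap (H ++ T) 0 (c + 1)
          = ((H.set 0 (H.getD (H.length - 1) 0)).dropLast ++ [H.getD 0 0]) ++ T := by
        rw [pvSwap_append _ _ _ _ (by omega) (by omega)]
        unfold pvSwap
        rw [set_last _ (c + 1) _ (by simp [hlen])]
        rw [show H.length - 1 = c + 1 by omega]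
      rw [hswap, List.append_assoc]
      have hLlen : ((H.set 0 (H.getD (H.length - 1) 0)).dropLast).length = c + 1 := by
        simp [hlen]
      have hinner := inner_eq (c + 1) ((H.set 0 (H.getD (H.length - 1) 0)).dropLast)
        ([H.getD 0 0] ++ T) 0 (by omega)
      rw [hLlen] at hinner
      rw [hinner]
      have hKlen : (siftB ((H.set 0 (H.getD (H.length - 1) 0)).dropLast) 0).length = c + 1 := by
        rw [siftB_length]; exact hLlen
      have hih := ih (siftB ((H.set 0 (H.getD (H.length - 1) 0)).dropLast) 0)
        ([H.getD 0 0] ++ T) hKlen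
      simp only [List.nil_append]
      rw [show c + 1 - 1 = c by omega, hih,
          outerB_acc (c + 1) _ ([H.getD 0 0]) (by rw [hKlen])]
      simp [List.append_assoc]
    · have hc0 : c = 0 := by omega
      subst hc0
      rw [outerA, if_neg hc, outerB, if_neg (by omega)]
      simp

-- ===== VERDICT (by name: the statement is the Claim_ definition above) =====
theorem toSorted_py_spec : Claim_equal_toSorted_py := by
  intro nums _hdom hpre
  unfold Pre_toSorted_py at hpre
  unfold Spec_toSorted_py toSorted_py toSorted_py_alt
  have h := main_eq (nums.length - 1) nums [] (by omega)
  rw [List.append_nil] at h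
  have h2 : outerA nums (nums.length - 1)
      = (outerB nums []).1 ++ (outerB nums []).2.reverse := by rw [h]; simp
  have hF : (outerB nums []).1.length = 2 :=
    outerB_fst_length nums.length nums (le_refl _) hpre
  simp only [h2]
  rw [getD_append_left _ _ 0 (by simp only [hF]; omega),
      getD_append_left _ _ 1 (by simp only [hF]; omega)]
  split
  · rw [pvSwap_append _ _ _ _ (by simp only [hF]; omega) (by simp only [hF]; omega)]
  · rfl
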